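-- pv_equiv track=rewrite | github.com/DawidAdamski/kaleta | src/kaleta/services/import_service.py | _value_after_key
-- ===== SOURCE A (Python) =====
-- def _value_after_key(lines: list[str], key: str) -> str:
--     """Return the first non-empty value that follows a line starting with *key*."""
--     for i, line in enumerate(lines):
--         if line.strip().startswith(key):
--             for j in range(i + 1, min(i + 5, len(lines))):
--                 val = lines[j].strip().rstrip(";").strip()
--                 if val:
--                     return val
--     return ""
-- ===== SOURCE B (Python) =====
-- def _value_after_key(lines: list[str], key: str) -> str:
--     """Single pass with a countdown window instead of nested index scans."""
--     remaining = 0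
--     for line in lines:
--         if remaining > 0:
--             val = line.strip().rstrip(";").strip()
--             if val:
--                 return val
--         if line.strip().startswith(key):
--             remaining = 4
--         else:
--             remaining = max(remaining - 1, 0)
--     return ""
-- ===== Notes on version B (the rewrite author's own statement) =====
-- stated objective: simpler
-- what changed: Replaced the nested scan (outer enumerate over key lines, inner 4-element index window re-reading lines[j]) by a single pass over the lines carrying an integer countdown of how many lines remain inside the last seen key's 4-line window.
import Mathlib
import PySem

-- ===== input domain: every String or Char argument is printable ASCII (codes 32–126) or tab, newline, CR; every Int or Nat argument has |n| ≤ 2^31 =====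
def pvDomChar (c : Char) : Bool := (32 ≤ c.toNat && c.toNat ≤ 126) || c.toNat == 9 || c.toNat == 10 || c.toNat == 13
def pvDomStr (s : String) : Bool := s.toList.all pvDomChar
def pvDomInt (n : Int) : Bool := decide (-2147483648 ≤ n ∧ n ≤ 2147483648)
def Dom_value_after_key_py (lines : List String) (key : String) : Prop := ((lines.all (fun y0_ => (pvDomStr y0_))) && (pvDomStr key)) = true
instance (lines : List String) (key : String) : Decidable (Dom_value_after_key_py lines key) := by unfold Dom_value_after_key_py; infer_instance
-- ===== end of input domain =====

-- B replaces A's nested key-scan + 4-line index window by a single pass carrying a countdown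
-- `remaining` of lines still inside a key's window (objective: simpler one-pass decomposition).

-- shared string helpers (both Pythons use the identical expressions)
-- hand port of s.rstrip(";") (single strip character): drop trailing ';' — exact
def pvRstripSemi (s : String) : String :=
  String.ofList ((s.toList.reverse.dropWhile (fun c => c = ';')).reverse)

-- line.strip().rstrip(";").strip()
def pvVal (s : String) : String := PySem.Str.strip (pvRstripSemi (PySem.Str.strip s))

-- line.strip().startswith(key)
def pvIsKey (key : String) (s : String) : Bool := PySem.Str.startswith (PySem.Str.strip s) key

-- ===== PORT A =====
-- inner loop: for j in range(i+1, min(i+5, len(lines))): val = …; if val: return val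
-- (pyGet? is always some here since j comes from an in-bounds range; none is unreachable)
def pvInnerA (lines : List String) : List Int → Option String
  | [] => none
  | j :: js =>
    match PySem.List.pyGet? lines j with
    | none => none
    | some l => if pvVal l ≠ "" then some (pvVal l) else pvInnerA lines js

-- outer loop: for i, line in enumerate(lines)
def pvOuterA (lines : List String) (key : String) : List (Int × String) → String
  | [] => ""
  | (i, line) :: rest =>
    if pvIsKey key line then
      match pvInnerA lines (PySem.List.pyRange (i + 1) (min (i + 5) (lines.length : Int)) 1) with
      | some v => v
      | none => pvOuterA lines key rest
    else pvOuterA lines key rest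

def value_after_key_py (lines : List String) (key : String) : String :=
  pvOuterA lines key (PySem.List.enumerate lines 0)

-- ===== PORT B =====
-- single pass: remaining counts the lines still inside the last key's 4-line window
def pvLoopB (key : String) : List String → Int → String
  | [], _ => ""
  | l :: ls, r =>
    if r > 0 ∧ pvVal l ≠ "" then pvVal l
    else pvLoopB key ls (if pvIsKey key l then 4 else max (r - 1) 0)

def value_after_key_py_alt (lines : List String) (key : String) : String :=
  pvLoopB key lines 0

-- ===== PRECONDITION & SPEC =====
def Spec_value_after_key_py (lines : List String) (key : String) (out : String) : Prop := out = value_after_key_py_alt lines key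
instance (lines : List String) (key : String) (out : String) : Decidable (Spec_value_after_key_py lines key out) := by unfold Spec_value_after_key_py; infer_instance

-- ===== CLAIM (what is proved, stated in full; the proofs are below) =====
def Claim_equal_value_after_key_py : Prop := ∀ (lines : List String) (key : String), Dom_value_after_key_py lines key → Spec_value_after_key_py lines key (value_after_key_py lines key)

-- ===== LEMMAS AND PROOFS =====

-- proof-side structural reformulations
-- first non-empty stripped value of a list
def pvFindNE : List String → Option String
  | [] => none
  | l :: ls => if pvVal l ≠ "" then some (pvVal l) else pvFindNE ls

-- A restated structurally: window of a key line = the next 4 lines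
def pvGoA (key : String) : List String → String
  | [] => ""
  | l :: ls =>
    if pvIsKey key l then
      match pvFindNE (ls.take 4) with
      | some v => v
      | none => pvGoA key ls
    else pvGoA key ls

-- B restated with a Nat countdown
def pvGoB (key : String) : List String → Nat → String
  | [], _ => ""
  | l :: ls, r =>
    if 0 < r ∧ pvVal l ≠ "" then pvVal l
    else pvGoB key ls (if pvIsKey key l then 4 else r - 1)

-- (L1) inner loop of A = pvFindNE of the windowed sublist
theorem pvInnerA_eq (n : Nat) : ∀ (ls : List String) (a b : Int), 0 ≤ a →
    b ≤ (ls.length : Int) → (b - a).toNat = n →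
    pvInnerA ls (PySem.List.pyRange a b 1) = pvFindNE ((ls.drop a.toNat).take n) := by
  induction n with
  | zero =>
    intro ls a b ha hb hn
    rw [PySem.List.pyRange_one_eq_nil (by omega)]
    simp [pvInnerA, pvFindNE]
  | succ n ih =>
    intro ls a b ha hb hn
    have hab : a < b := by omega
    have halen : a.toNat < ls.length := by omega
    rw [PySem.List.pyRange_one_cons hab]
    rw [List.drop_eq_getElem_cons halen]
    simp only [pvInnerA, pvFindNE, List.take_succ_cons]
    rw [PySem.List.pyGet?_eq_some_getElem ls ha (by omega)]
    by_cases hv : pvVal ls[a.toNat] ≠ ""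
    · simp [hv]
    · simp only [hv, ite_false]
      have heq := ih ls (a + 1) b (by omega) hb (by omega)
      rw [heq]
      have h2 : (a + 1).toNat = a.toNat + 1 := by omega
      rw [h2]

-- (L2) outer loop of A on an enumerated suffix = pvGoA on the suffix
theorem pvOuterA_eq : ∀ (suffix lines : List String) (key : String) (i : Nat),
    lines.drop i = suffix →
    pvOuterA lines key (PySem.List.enumerate suffix (i : Int)) = pvGoA key suffix := by
  intro suffix
  induction suffix with
  | nil => intro lines key i h; simp [PySem.List.enumerate_nil, pvOuterA, pvGoA]
  | cons l ls ih =>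
    intro lines key i h
    have hlt : i < lines.length := by
      by_contra hc
      rw [List.drop_eq_nil_of_le (by omega)] at h
      exact List.cons_ne_nil _ _ h.symm
    have hdrop : lines.drop (i + 1) = ls := by
      have ht := congrArg List.tail h
      rwa [List.tail_drop] at ht
    have hlen : lines.length = i + 1 + ls.length := by
      have := congrArg List.length h
      simp [List.length_drop] at this
      omega
    rw [PySem.List.enumerate_cons]
    simp only [pvOuterA, pvGoA]
    by_cases hk : pvIsKey key l
    · simp only [hk, if_true]
      have h1 : pvInnerA lines (PySem.List.pyRange ((i : Int) + 1) (min ((i : Int) + 5) (lines.length : Int)) 1)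
          = pvFindNE ((lines.drop ((i : Int) + 1).toNat).take ((min ((i : Int) + 5) (lines.length : Int) - ((i : Int) + 1)).toNat)) :=
        pvInnerA_eq _ lines _ _ (by omega) (by omega) rfl
      have h2 : ((i : Int) + 1).toNat = i + 1 := by omega
      have h3 : (min ((i : Int) + 5) (lines.length : Int) - ((i : Int) + 1)).toNat = min 4 ls.length := by omega
      rw [h1, h2, h3, hdrop]
      have h4 : ls.take (min 4 ls.length) = ls.take 4 := by
        rw [← List.take_take, List.take_length]
      rw [h4]
      cases hfe : pvFindNE (ls.take 4) with
      | some v => simp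
      | none =>
        simp only []
        have := ih lines key (i + 1) hdrop
        rw [← this]
        norm_cast
    · simp only [hk, if_false, Bool.false_eq_true]
      have := ih lines key (i + 1) hdrop
      rw [← this]
      norm_cast

-- (L3) pvFindNE on a longer prefix keeps an existing hit
theorem pvFindNE_take_mono : ∀ (ls : List String) (r r' : Nat) (v : String), r ≤ r' →
    pvFindNE (ls.take r) = some v → pvFindNE (ls.take r') = some v := by
  intro ls
  induction ls with
  | nil => intro r r' v _ h; simp [pvFindNE] at h
  | cons l t ih =>
    intro r r' v hrr h
    cases r with
    | zero => simp [pvFindNE] at h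
    | succ r =>
      cases r' with
      | zero => omega
      | succ r' =>
        simp only [List.take_succ_cons, pvFindNE] at h ⊢
        by_cases hv : pvVal l ≠ ""
        · simpa [hv] using h
        · simp only [hv, ite_false, if_neg] at h ⊢
          exact ih r r' v (by omega) h

-- (L4) when the live window contains a non-empty value, pvGoB returns the first one
theorem pvGoB_hit : ∀ (ls : List String) (key : String) (r : Nat) (v : String), r ≤ 4 →
    pvFindNE (ls.take r) = some v → pvGoB key ls r = v := by
  intro ls
  induction ls with
  | nil => intro key r v _ h; simp [pvFindNE] at h
  | cons l t ih =>
    intro key r v hr h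
    cases r with
    | zero => simp [pvFindNE] at h
    | succ r =>
      simp only [List.take_succ_cons, pvFindNE] at h
      simp only [pvGoB]
      by_cases hv : pvVal l ≠ ""
      · rw [if_pos hv] at h
        rw [if_pos ⟨Nat.succ_pos r, hv⟩]
        exact Option.some.inj h
      · rw [if_neg hv] at h
        rw [if_neg (fun hc => hv hc.2)]
        by_cases hk : pvIsKey key l = true
        · rw [if_pos hk]
          exact ih key 4 v (by omega) (pvFindNE_take_mono t r 4 v (by omega) h)
        · rw [if_neg hk]
          exact ih key r v (by omega) h

-- (MAIN) pvGoB with an all-empty live window = pvGoA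
theorem pvGoB_eq_pvGoA : ∀ (ls : List String) (key : String) (r : Nat), r ≤ 4 →
    pvFindNE (ls.take r) = none → pvGoB key ls r = pvGoA key ls := by
  intro ls
  induction ls with
  | nil => intro key r _ _; simp [pvGoB, pvGoA]
  | cons l t ih =>
    intro key r hr h
    have hcase : ¬ (0 < r ∧ pvVal l ≠ "") := by
      rintro ⟨hrpos, hv⟩
      cases r with
      | zero => omega
      | succ r => simp [pvFindNE, hv] at h
    have htail : pvFindNE (t.take (r - 1)) = none := by
      cases r with
      | zero => simp [pvFindNE]
      | succ r =>
        simp only [List.take_succ_cons, pvFindNE] at h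
        by_cases hv : pvVal l ≠ ""
        · simp [hv] at h
        · simpa [hv] using h
    simp only [pvGoB, pvGoA, hcase, if_neg, ite_false]
    by_cases hk : pvIsKey key l
    · simp only [hk, if_true]
      cases hfe : pvFindNE (t.take 4) with
      | some v => exact pvGoB_hit t key 4 v (by omega) hfe
      | none => exact ih key 4 (by omega) hfe
    · simp only [hk, if_false, Bool.false_eq_true]
      exact ih key (r - 1) (by omega) htail

-- (L5) B's Int countdown = the Nat countdown
theorem pvLoopB_eq_pvGoB : ∀ (ls : List String) (key : String) (r : Int), 0 ≤ r →
    pvLoopB key ls r = pvGoB key ls r.toNat := by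
  intro ls
  induction ls with
  | nil => intro key r _; simp [pvLoopB, pvGoB]
  | cons l t ih =>
    intro key r hr
    simp only [pvLoopB, pvGoB]
    by_cases hcond : r > 0 ∧ pvVal l ≠ ""
    · have : 0 < r.toNat ∧ pvVal l ≠ "" := ⟨by omega, hcond.2⟩
      simp [hcond, this]
    · have hnc : ¬ (0 < r.toNat ∧ pvVal l ≠ "") := by
        rintro ⟨h1, h2⟩; exact hcond ⟨by omega, h2⟩
      simp only [hcond, hnc, if_neg, ite_false]
      by_cases hk : pvIsKey key l
      · simp only [hk, if_true]
        have := ih key 4 (by omega)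
        simpa using this
      · simp only [hk, if_false, Bool.false_eq_true]
        have h0 : (0 : Int) ≤ max (r - 1) 0 := le_max_right _ _
        rw [ih key (max (r - 1) 0) h0]
        congr 1
        omega

-- ===== VERDICT (by name: the statement is the Claim_ definition above) =====
theorem value_after_key_py_spec : Claim_equal_value_after_key_py := by
  intro lines key _
  show value_after_key_py lines key = value_after_key_py_alt lines key
  unfold value_after_key_py value_after_key_py_alt
  have hA : pvOuterA lines key (PySem.List.enumerate lines (0 : Int)) = pvGoA key lines :=
    pvOuterA_eq lines lines key 0 (by simp)
  have hB : pvLoopB key lines 0 = pvGoB key lines 0 :=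
    pvLoopB_eq_pvGoB lines key 0 le_rfl
  rw [hA, hB, pvGoB_eq_pvGoA lines key 0 (by omega) (by simp [pvFindNE])]
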